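-- pv_equiv track=rewrite | github.com/MohammedDev315/estimating_movies-_price-linear_project | split_moves_type.py | return_moves_to_array
-- ===== SOURCE A (Python) =====
-- def return_moves_to_array(data_in):
--     all_type_of_move = []
--     if "&" in data_in:
--         data_in = data_in.replace('&' , '')
--     if "," in data_in:
--         data_in = data_in.replace(','  , '')
--     for x in data_in.split(' '):
--         if x != '':
--             all_type_of_move.append(x)
--     return all_type_of_move
-- ===== SOURCE B (Python) =====
-- def return_moves_to_array(data_in):
--     tokens = []
--     cur = ''
--     for ch in data_in:
--         if ch == '&' or ch == ',':
--             continue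
--         if ch == ' ':
--             if cur:
--                 tokens.append(cur)
--                 cur = ''
--         else:
--             cur += ch
--     if cur:
--         tokens.append(cur)
--     return tokens
-- ===== Notes on version B (the rewrite author's own statement) =====
-- stated objective: alternative
-- what changed: Replaces A's three passes (replace '&', replace ',', split-then-filter) by a single character-at-a-time tokenizer that skips separators and flushes the current token at spaces.
import Mathlib
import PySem

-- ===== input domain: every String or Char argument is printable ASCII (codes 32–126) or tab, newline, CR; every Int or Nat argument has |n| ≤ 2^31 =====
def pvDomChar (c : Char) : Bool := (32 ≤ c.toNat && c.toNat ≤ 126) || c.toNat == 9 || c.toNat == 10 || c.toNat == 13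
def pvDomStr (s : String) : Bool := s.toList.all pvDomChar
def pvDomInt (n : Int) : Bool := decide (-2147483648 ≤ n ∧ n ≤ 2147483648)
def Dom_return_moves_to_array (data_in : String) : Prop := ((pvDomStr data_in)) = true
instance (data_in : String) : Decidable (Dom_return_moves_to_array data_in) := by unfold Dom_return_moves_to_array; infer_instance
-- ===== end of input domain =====

-- B replaces A's three passes (delete '&', delete ',', split-then-filter) by one
-- character-at-a-time tokenizer; same output, alternative decomposition.

-- ===== PORT A =====
def return_moves_to_array (data_in : String) : List String :=
  let d1 := if PySem.Str.isIn "&" data_in then PySem.Str.replace data_in "&" "" else data_in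
  let d2 := if PySem.Str.isIn "," d1 then PySem.Str.replace d1 "," "" else d1
  ((PySem.Str.split? d2 " ").getD []).foldl
    (fun acc x => if x != "" then acc ++ [x] else acc) []

-- ===== PORT B =====
-- the tokenizer loop of Source B: skip '&'/',', flush the current token at ' ', else extend it
def pvTokGo : List Char → List Char → List String
  | [], cur => if cur = [] then [] else [String.ofList cur]
  | c :: rest, cur =>
    if c = '&' || c = ',' then pvTokGo rest cur
    else if c = ' ' then
      (if cur = [] then pvTokGo rest [] else String.ofList cur :: pvTokGo rest [])
    else pvTokGo rest (cur ++ [c])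

def return_moves_to_array_alt (data_in : String) : List String :=
  pvTokGo data_in.toList []

-- ===== PRECONDITION & SPEC =====
def Spec_return_moves_to_array (data_in : String) (out : List String) : Prop := out = return_moves_to_array_alt data_in
instance (data_in : String) (out : List String) : Decidable (Spec_return_moves_to_array data_in out) := by unfold Spec_return_moves_to_array; infer_instance

-- ===== CLAIM (what is proved, stated in full; the proofs are below) =====
def Claim_equal_return_moves_to_array : Prop := ∀ (data_in : String), Dom_return_moves_to_array data_in → Spec_return_moves_to_array data_in (return_moves_to_array data_in)

-- ===== LEMMAS AND PROOFS =====

-- reference splitter: str.split(' ') as plain structural recursion (proof-only)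
def pvSplit' : List Char → List Char → List (List Char)
  | pre, [] => [pre]
  | pre, c :: t => if c = ' ' then pre :: pvSplit' [] t else pvSplit' (pre ++ [c]) t

theorem pvReplaceGo_filter (a : Char) :
    ∀ (fuel : Nat) (l acc : List Char), l.length ≤ fuel →
      PySem.Chars.replace.go [a] [] fuel l acc = acc.reverse ++ l.filter (fun c => c != a) := by
  intro fuel
  induction fuel with
  | zero =>
    intro l acc h
    have : l = [] := List.eq_nil_of_length_eq_zero (Nat.le_zero.mp h)
    subst this
    simp [PySem.Chars.replace.go]
  | succ n ih =>
    intro l acc h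
    cases l with
    | nil => simp [PySem.Chars.replace.go]
    | cons c t =>
      by_cases hc : c = a
      · subst hc
        have hp : List.isPrefixOf [c] (c :: t) = true := by simp [List.isPrefixOf]
        rw [PySem.Chars.replace.go]
        simp only [hp, if_pos, List.length_cons, List.drop_succ_cons, List.drop_zero,
          List.reverse_nil, List.nil_append, List.length_nil, List.drop_zero]
        rw [ih t acc (by simpa using h)]
        simp
      · have hp : List.isPrefixOf [a] (c :: t) = false := by
          simp [List.isPrefixOf]
          exact fun h' => hc h'.symm
        rw [PySem.Chars.replace.go]
        simp only [hp]
        rw [ih t (c :: acc) (by simpa using h)]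
        simp [hc]

theorem pvReplace_filter (a : Char) (cs : List Char) :
    PySem.Chars.replace cs [a] [] = cs.filter (fun c => c != a) := by
  rw [PySem.Chars.replace]
  simp only [List.isEmpty_cons, if_neg, Bool.false_eq_true, not_false_iff]
  rw [pvReplaceGo_filter a cs.length cs [] le_rfl]
  simp

theorem pvGuard_filter (a : Char) (cs : List Char) :
    (if PySem.Chars.isIn [a] cs then PySem.Chars.replace cs [a] [] else cs)
      = cs.filter (fun c => c != a) := by
  by_cases h : PySem.Chars.isIn [a] cs = true
  · rw [if_pos h]; exact pvReplace_filter a cs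
  · rw [if_neg h]
    have hmem : a ∉ cs := by
      intro hm
      apply h
      rw [PySem.Chars.isIn_iff_infix]
      obtain ⟨l1, l2, rfl⟩ := List.append_of_mem hm
      exact ⟨l1, l2, by simp⟩
    symm
    rw [List.filter_eq_self]
    intro b hb
    simp only [bne_iff_ne, ne_eq]
    intro rfl'
    exact hmem (rfl' ▸ hb)

theorem pvSplitGo_eq :
    ∀ (fuel : Nat) (l cur : List Char) (acc : List (List Char)), l.length < fuel →
      PySem.Chars.splitOn.go [' '] fuel l cur acc = acc.reverse ++ pvSplit' cur.reverse l := by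
  intro fuel
  induction fuel with
  | zero => intro l cur acc h; omega
  | succ n ih =>
    intro l cur acc h
    cases l with
    | nil => simp [PySem.Chars.splitOn.go, pvSplit']
    | cons c t =>
      by_cases hc : c = ' '
      · subst hc
        have hp : List.isPrefixOf [' '] (' ' :: t) = true := by simp [List.isPrefixOf]
        rw [PySem.Chars.splitOn.go]
        simp only [hp, if_pos, List.length_singleton, List.drop_succ_cons, List.drop_zero]
        rw [ih t [] (cur.reverse :: acc) (by simpa using h)]
        simp [pvSplit']
      · have hp : List.isPrefixOf [' '] (c :: t) = false := by
          simp [List.isPrefixOf]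
          exact fun h' => hc h'.symm
        rw [PySem.Chars.splitOn.go]
        simp only [hp, Bool.false_eq_true, if_neg, not_false_iff]
        rw [ih t (c :: cur) acc (by simpa using h)]
        simp [pvSplit', hc]

theorem pvSplitOn_eq (ds : List Char) :
    PySem.Chars.splitOn ds [' '] = pvSplit' [] ds := by
  rw [PySem.Chars.splitOn, pvSplitGo_eq (ds.length + 1) ds [] [] (by omega)]
  simp

theorem pvTokGo_eq :
    ∀ (cs cur : List Char),
      pvTokGo cs cur
        = ((pvSplit' cur (cs.filter (fun c => c != ',' && c != '&'))).filter
            (fun x => x != [])).map String.ofList := by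
  intro cs
  induction cs with
  | nil =>
    intro cur
    by_cases h : cur = []
    · subst h; simp [pvTokGo, pvSplit']
    · simp [pvTokGo, pvSplit', h]
  | cons c t ih =>
    intro cur
    by_cases hsep : c = '&' ∨ c = ','
    · have h1 : (c = '&' || c = ',') = true := by
        rcases hsep with rfl | rfl <;> simp
      have h2 : (c != ',' && c != '&') = false := by
        rcases hsep with rfl | rfl <;> simp
      rw [pvTokGo]
      simp only [h1, if_pos, List.filter_cons, h2, Bool.false_eq_true, if_neg, not_false_iff]
      exact ih cur
    · rw [not_or] at hsep
      obtain ⟨ha, hb⟩ := hsep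
      have h1 : (c = '&' || c = ',') = false := by simp [ha, hb]
      have h2 : (c != ',' && c != '&') = true := by simp [ha, hb]
      by_cases hsp : c = ' '
      · subst hsp
        rw [pvTokGo]
        simp only [h1, Bool.false_eq_true, if_neg, not_false_iff, if_pos,
          List.filter_cons, h2]
        by_cases hc : cur = []
        · subst hc
          rw [ih []]
          simp [pvSplit']
        · simp only [if_neg hc]
          rw [ih []]
          simp [pvSplit', hc]
      · rw [pvTokGo]
        simp only [h1, Bool.false_eq_true, if_neg, not_false_iff, hsp,
          List.filter_cons, h2]
        rw [ih (cur ++ [c])]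
        simp [pvSplit', hsp]

theorem pvOfList_ne (x : List Char) : (String.ofList x != "") = (x != []) := by
  rcases x with _ | ⟨c, t⟩
  · rfl
  · have h : String.ofList (c :: t) ≠ "" := by
      intro h
      have := congrArg String.toList h
      simp at this
    rw [Bool.eq_iff_iff]
    simp [h]

theorem return_moves_to_array_eq (s : String) :
    return_moves_to_array s = return_moves_to_array_alt s := by
  simp only [return_moves_to_array, return_moves_to_array_alt]
  have hA : (if PySem.Str.isIn "&" s then PySem.Str.replace s "&" "" else s).toList
      = s.toList.filter (fun c => c != '&') := by
    rw [apply_ite String.toList]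
    simp only [PySem.Str.isIn_eq, PySem.Str.toList_replace]
    have hAmp : ("&" : String).toList = ['&'] := by decide
    have hNil : ("" : String).toList = [] := by decide
    rw [hAmp, hNil]
    exact pvGuard_filter '&' s.toList
  set d1 := if PySem.Str.isIn "&" s then PySem.Str.replace s "&" "" else s with hd1
  have hB : (if PySem.Str.isIn "," d1 then PySem.Str.replace d1 "," "" else d1).toList
      = d1.toList.filter (fun c => c != ',') := by
    rw [apply_ite String.toList]
    simp only [PySem.Str.isIn_eq, PySem.Str.toList_replace]
    have hc : ("," : String).toList = [','] := by decide
    have hNil : ("" : String).toList = [] := by decide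
    rw [hc, hNil]
    exact pvGuard_filter ',' d1.toList
  set d2 := if PySem.Str.isIn "," d1 then PySem.Str.replace d1 "," "" else d1 with hd2
  have hds : d2.toList = s.toList.filter (fun c => c != ',' && c != '&') := by
    rw [hB, hA, List.filter_filter]
  have hsplit : PySem.Str.split? d2 " " = some ((pvSplit' [] d2.toList).map String.ofList) := by
    rw [PySem.Str.split?, PySem.Chars.split?]
    have hsp : (" " : String).toList = [' '] := by decide
    rw [hsp]
    simp [pvSplitOn_eq]
  rw [hsplit]
  simp only [Option.getD_some]
  rw [PySem.List.foldl_append_if (fun x => x != "") (fun x => x) _ []]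
  simp only [List.nil_append, List.map_id', List.filter_map]
  have hp : ((fun x => x != "") ∘ String.ofList) = (fun x => x != ([] : List Char)) := by
    funext x
    simp only [Function.comp_apply]
    exact pvOfList_ne x
  rw [hp, pvTokGo_eq s.toList [], hds]

-- ===== VERDICT (by name: the statement is the Claim_ definition above) =====
theorem return_moves_to_array_spec : Claim_equal_return_moves_to_array := by
  intro s _
  exact return_moves_to_array_eq s
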